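-- pv_equiv track=rewrite | github.com/nit4y/boggle-pygame | ex12_utils.py | _find_correct_paths
-- ===== SOURCE A (Python) =====
-- from typing import List, Set, Tuple
--
-- def _find_correct_paths(all_paths: List[Tuple[str, List[Tuple[int, int]]]], words: Set[str]) -> List[List[Tuple[int,int]]]:
--     """
--     filters all the paths to ensure that the longest path for each word is returned
--     :param all_paths: all the paths matching the creteria, that was found by __max_score_paths_core
--     :param words: the set of the words to search from
--     :return: the list of the paths that results in a perfect boggle game, with maximum score.
--     """
--     corect_paths = {}
--     for path_tuple in all_paths:
--         word, path = path_tuple[0], path_tuple[1]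
--         if word in words:
--             if word not in corect_paths:
--                 corect_paths[word] = path
--             else:
--                 if len(path) > len(corect_paths[word]):
--                     corect_paths[word] = path
--     #now we will extract the paths:
--     correct_paths_list = []
--     for word in corect_paths:
--         correct_paths_list.append(corect_paths[word])
--     return correct_paths_list
-- ===== SOURCE B (Python) =====
-- from typing import List, Set, Tuple
--
-- def _find_correct_paths(all_paths: List[Tuple[str, List[Tuple[int, int]]]], words: Set[str]) -> List[List[Tuple[int,int]]]:
--     # Dict-free two-phase scheme: first collect the valid words in order of
--     # first occurrence, then for each such word rescan all_paths and take
--     # the first longest candidate path (max(key=len) returns the first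
--     # maximal element, matching the original's strict-greater update).
--     seen = []
--     for word, _ in all_paths:
--         if word in words and word not in seen:
--             seen.append(word)
--     return [max((p for w, p in all_paths if w == word), key=len) for word in seen]
-- ===== Notes on version B (the rewrite author's own statement) =====
-- stated objective: alternative
-- what changed: Drops the running-best dict entirely: B first collects the valid words in first-occurrence order in a plain list, then for each such word rescans all_paths and takes the first longest candidate path with max(key=len).
import Mathlib
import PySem

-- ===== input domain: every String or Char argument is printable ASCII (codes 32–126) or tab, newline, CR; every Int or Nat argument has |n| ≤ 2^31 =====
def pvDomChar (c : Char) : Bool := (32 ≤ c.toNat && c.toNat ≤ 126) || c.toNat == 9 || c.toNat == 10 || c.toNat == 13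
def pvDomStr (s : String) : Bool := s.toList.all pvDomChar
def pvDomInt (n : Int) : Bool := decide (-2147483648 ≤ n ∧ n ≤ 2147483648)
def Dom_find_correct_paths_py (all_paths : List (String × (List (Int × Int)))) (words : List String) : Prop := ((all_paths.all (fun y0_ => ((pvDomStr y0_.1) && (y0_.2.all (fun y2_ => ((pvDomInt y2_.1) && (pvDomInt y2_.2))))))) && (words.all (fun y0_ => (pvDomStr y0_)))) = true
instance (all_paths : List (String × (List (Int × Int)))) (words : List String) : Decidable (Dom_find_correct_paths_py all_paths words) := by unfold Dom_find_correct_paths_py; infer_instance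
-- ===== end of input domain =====

-- B drops A's running-best dict: it collects valid words in first-occurrence order, then rescans all_paths per word for the first longest path; same result, alternative decomposition.

-- ===== PORT A =====
-- one loop iteration of A: keep the strictly longer path per valid word
def aStep (words : List String) (d : PySem.Dict String (List (Int × Int)))
    (pt : String × (List (Int × Int))) : PySem.Dict String (List (Int × Int)) :=
  let word := pt.1
  let path := pt.2
  if word ∈ words then
    if ¬ d.contains word then d.insert word path
    else if path.length > (d.getD word []).length then d.insert word path  -- corect_paths[word] exists here, so getD is exact
    else d
  else d

def find_correct_paths_py (all_paths : List (String × (List (Int × Int)))) (words : List String) : List (List (Int × Int)) :=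
  let d := all_paths.foldl (aStep words) PySem.Dict.empty
  -- 'for word in corect_paths: correct_paths_list.append(corect_paths[word])'
  d.keys.foldl (fun acc w => acc ++ [d.getD w []]) []

-- ===== PORT B =====
-- first loop of B: 'if word in words and word not in seen: seen.append(word)'
def bSeen (words : List String) (seen : List String) (pt : String × (List (Int × Int))) : List String :=
  if pt.1 ∈ words ∧ pt.1 ∉ seen then seen ++ [pt.1] else seen

-- the generator '(p for w, p in all_paths if w == word)'
def bCands (all_paths : List (String × (List (Int × Int)))) (w : String) : List (List (Int × Int)) :=
  all_paths.filterMap (fun pt => if pt.1 == w then some pt.2 else none)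

def find_correct_paths_py_alt (all_paths : List (String × (List (Int × Int)))) (words : List String) : List (List (Int × Int)) :=
  let seen := all_paths.foldl (bSeen words) []
  -- '[max(..., key=len) for word in seen]'; every seen word has a candidate, so max? is always some
  seen.filterMap (fun w => PySem.List.max? (bCands all_paths w) (fun p => p.length))

-- ===== PRECONDITION & SPEC =====
def Spec_find_correct_paths_py (all_paths : List (String × (List (Int × Int)))) (words : List String) (out : List (List (Int × Int))) : Prop := out = find_correct_paths_py_alt all_paths words
instance (all_paths : List (String × (List (Int × Int)))) (words : List String) (out : List (List (Int × Int))) : Decidable (Spec_find_correct_paths_py all_paths words out) := by unfold Spec_find_correct_paths_py; infer_instance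

-- ===== CLAIM (what is proved, stated in full; the proofs are below) =====
def Claim_equal_find_correct_paths_py : Prop := ∀ (all_paths : List (String × (List (Int × Int)))) (words : List String), Dom_find_correct_paths_py all_paths words → Spec_find_correct_paths_py all_paths words (find_correct_paths_py all_paths words)

-- ===== LEMMAS AND PROOFS =====

-- Python's max(key) is the running strict-greater loop: its value on xs ++ [x]
lemma max?_append_singleton {α : Type} (xs : List α) (x : α) (key : α → Nat) :
    PySem.List.max? (xs ++ [x]) key =
      match PySem.List.max? xs key with
      | none => some x
      | some m => if key m < key x then some x else some m := by
  show List.foldl _ none (xs ++ [x]) = _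
  rw [List.foldl_append]
  rfl

-- every word collected by B's first loop lies in words (or was already in seen)
lemma bSeen_mem (words : List String) (l : List (String × (List (Int × Int)))) :
    ∀ seen, (∀ w ∈ seen, w ∈ words) → ∀ w ∈ l.foldl (bSeen words) seen, w ∈ words := by
  induction l with
  | nil => intro seen h w hw; exact h w hw
  | cons pt l ih =>
    intro seen h w hw
    refine ih (bSeen words seen pt) ?_ w hw
    intro v hv
    unfold bSeen at hv
    by_cases hc : pt.1 ∈ words ∧ pt.1 ∉ seen
    · rw [if_pos hc] at hv
      rcases List.mem_append.mp hv with hv | hv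
      · exact h v hv
      · exact (List.mem_singleton.mp hv) ▸ hc.1
    · rw [if_neg hc] at hv
      exact h v hv

-- main invariant: A's dict keys are B's seen list, and A's stored path for each
-- valid word is the first-longest candidate of B's rescan
lemma inv (words : List String) (l : List (String × (List (Int × Int)))) :
    (l.foldl (aStep words) PySem.Dict.empty).keys = l.foldl (bSeen words) [] ∧
    ∀ w ∈ words, (l.foldl (aStep words) PySem.Dict.empty).get? w =
      PySem.List.max? (bCands l w) (fun p => p.length) := by
  induction l using List.reverseRecOn with
  | nil =>
    refine ⟨by simp [PySem.Dict.keys_empty], fun w _ => ?_⟩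
    simp [PySem.Dict.get?_empty, bCands, PySem.List.max?]
  | append_singleton l pt ih =>
    obtain ⟨hkeys, hget⟩ := ih
    set d := l.foldl (aStep words) PySem.Dict.empty with hd
    set seen := l.foldl (bSeen words) [] with hs
    have hfoldA : (l ++ [pt]).foldl (aStep words) PySem.Dict.empty = aStep words d pt := by
      rw [List.foldl_append]; rfl
    have hfoldB : (l ++ [pt]).foldl (bSeen words) [] = bSeen words seen pt := by
      rw [List.foldl_append]; rfl
    have hcands : ∀ w, bCands (l ++ [pt]) w =
        bCands l w ++ (if pt.1 == w then [pt.2] else []) := by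
      intro w
      unfold bCands
      rw [List.filterMap_append]
      congr 1
      by_cases h : pt.1 = w <;> simp [h]
    rw [hfoldA, hfoldB]
    by_cases hw : pt.1 ∈ words
    · by_cases hc : d.contains pt.1
      · -- already seen word
        have hmemseen : pt.1 ∈ seen := hkeys ▸ (PySem.Dict.contains_iff_mem_keys d pt.1).mp hc
        have hbs : bSeen words seen pt = seen := by
          unfold bSeen; rw [if_neg (by intro h; exact h.2 hmemseen)]
        obtain ⟨m, hm⟩ : ∃ m, d.get? pt.1 = some m := by
          have : (d.get? pt.1).isSome := by rw [← PySem.Dict.contains_eq_isSome_get?, hc]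
          exact Option.isSome_iff_exists.mp this
        have hgd : d.getD pt.1 [] = m := PySem.Dict.getD_of_get?_eq_some d [] hm
        refine ⟨?_, ?_⟩
        · rw [hbs, ← hkeys]
          simp only [aStep, hw, hc, if_true, not_true, if_false]
          split
          · exact PySem.Dict.keys_insert_of_contains d _ hc
          · rfl
        · intro w hwin
          rw [hcands w]
          by_cases hwk : w = pt.1
          · subst hwk
            rw [if_pos (by simp), max?_append_singleton, ← hget pt.1 hwin, hm]
            simp only [aStep, hw, hc, if_true, not_true, if_false, hgd]
            by_cases hlt : m.length < pt.2.length
            · simp [hlt, PySem.Dict.get?_insert_self]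
            · simp [hlt, hm]
          · rw [if_neg (by simp [Ne.symm hwk]), List.append_nil, ← hget w hwin]
            simp only [aStep, hw, hc, if_true, not_true, if_false]
            split
            · exact PySem.Dict.get?_insert_of_ne d _ hwk
            · rfl
      · -- new word
        have hc' : d.contains pt.1 = false := by simpa using hc
        have hnot : pt.1 ∉ seen := by
          rw [← hkeys]; intro hmem
          exact absurd ((PySem.Dict.contains_iff_mem_keys d pt.1).mpr hmem) (by simp [hc'])
        have hA : aStep words d pt = d.insert pt.1 pt.2 := by
          simp only [aStep, hw, hc', if_true]
          rw [if_pos (show ¬false = true by simp)]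
        have hB : bSeen words seen pt = seen ++ [pt.1] := by
          unfold bSeen; rw [if_pos ⟨hw, hnot⟩]
        refine ⟨?_, ?_⟩
        · rw [hA, hB, PySem.Dict.keys_insert_of_not_contains d _ hc', hkeys]
        · intro w hwin
          rw [hcands w, hA]
          by_cases hwk : w = pt.1
          · subst hwk
            have hnone : d.get? pt.1 = none := by
              cases h : d.get? pt.1 with
              | none => rfl
              | some m =>
                have hct : d.contains pt.1 = true := by
                  rw [PySem.Dict.contains_eq_isSome_get?, h]; rfl
                simp [hct] at hc'
            rw [if_pos (by simp), max?_append_singleton, ← hget pt.1 hwin, hnone,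
              PySem.Dict.get?_insert_self]
          · rw [if_neg (by simp [Ne.symm hwk]), List.append_nil, ← hget w hwin]
            exact PySem.Dict.get?_insert_of_ne d _ hwk
    · -- invalid word: both sides ignore it
      have hA : aStep words d pt = d := by simp [aStep, hw]
      have hB : bSeen words seen pt = seen := by
        unfold bSeen; rw [if_neg (by intro h; exact hw h.1)]
      refine ⟨by rw [hA, hB]; exact hkeys, ?_⟩
      intro w hwin
      rw [hcands w, hA]
      have hne : ¬ (pt.1 == w) = true := by
        intro h; exact hw ((eq_of_beq h) ▸ hwin)
      rw [if_neg hne, List.append_nil, hget w hwin]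

lemma filterMap_eq_map_of_mem {α β : Type} (l : List α) (f : α → Option β) (h : α → β)
    (hf : ∀ x ∈ l, f x = some (h x)) : l.filterMap f = l.map h := by
  induction l with
  | nil => rfl
  | cons a l ih =>
    simp [hf a (by simp), ih (fun x hx => hf x (by simp [hx]))]

-- ===== VERDICT (by name: the statement is the Claim_ definition above) =====
theorem find_correct_paths_py_spec : Claim_equal_find_correct_paths_py := by
  intro all_paths words _
  obtain ⟨hkeys, hget⟩ := inv words all_paths
  show find_correct_paths_py all_paths words = find_correct_paths_py_alt all_paths words
  unfold find_correct_paths_py find_correct_paths_py_alt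
  simp only []
  set d := all_paths.foldl (aStep words) PySem.Dict.empty with hd
  rw [PySem.List.foldl_append_singleton_eq_map, List.nil_append, ← hkeys]
  symm
  apply filterMap_eq_map_of_mem
  intro w hwmem
  have hwords : w ∈ words := bSeen_mem words all_paths [] (by simp) w (hkeys ▸ hwmem)
  obtain ⟨m, hm⟩ : ∃ m, d.get? w = some m := by
    have : (d.get? w).isSome := by
      rw [← PySem.Dict.contains_eq_isSome_get?]
      exact (PySem.Dict.contains_iff_mem_keys d w).mpr hwmem
    exact Option.isSome_iff_exists.mp this
  rw [← hget w hwords, hm, PySem.Dict.getD_of_get?_eq_some d [] hm]
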